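-- pv_equiv track=rewrite | github.com/paul17crib/envoy-cli | envoy/sorter.py | group_sort
-- ===== SOURCE A (Python) =====
-- from typing import Dict, List, Optional, Tuple
--
-- def group_sort(
--     env: Dict[str, str],
--     delimiter: str = "_",
--     reverse: bool = False,
-- ) -> Dict[str, str]:
--     """Sort keys grouping by prefix (portion before first delimiter)."""
--     def group_key(k: str) -> Tuple[str, str]:
--         parts = k.split(delimiter, 1)
--         prefix = parts[0].lower()
--         rest = parts[1].lower() if len(parts) > 1 else ""
--         return (prefix, rest)
--
--     sorted_keys = sorted(env.keys(), key=group_key, reverse=reverse)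
--     return {k: env[k] for k in sorted_keys}
-- ===== SOURCE B (Python) =====
-- def group_sort(env, delimiter="_", reverse=False):
--     """Sort keys grouping by prefix (portion before first delimiter)."""
--     def prefix_of(k):
--         i = k.find(delimiter)
--         return (k if i < 0 else k[:i]).lower()
--
--     def rest_of(k):
--         i = k.find(delimiter)
--         return "" if i < 0 else k[i + len(delimiter):].lower()
--
--     buckets = {}
--     for k in env:
--         buckets.setdefault(prefix_of(k), []).append(k)
--
--     result = {}
--     for p in sorted(buckets, reverse=reverse):
--         for k in sorted(buckets[p], key=rest_of, reverse=reverse):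
--             result[k] = env[k]
--     return result
-- ===== Notes on version B (the rewrite author's own statement) =====
-- stated objective: alternative
-- what changed: Replaces the single stable sort under a (prefix, rest) tuple key by a bucket decomposition: keys are grouped by lowercased prefix (computed with find/slicing instead of split), the prefixes are sorted, each bucket is sorted by lowercased rest, and the result dict is filled bucket by bucket.
import Mathlib
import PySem

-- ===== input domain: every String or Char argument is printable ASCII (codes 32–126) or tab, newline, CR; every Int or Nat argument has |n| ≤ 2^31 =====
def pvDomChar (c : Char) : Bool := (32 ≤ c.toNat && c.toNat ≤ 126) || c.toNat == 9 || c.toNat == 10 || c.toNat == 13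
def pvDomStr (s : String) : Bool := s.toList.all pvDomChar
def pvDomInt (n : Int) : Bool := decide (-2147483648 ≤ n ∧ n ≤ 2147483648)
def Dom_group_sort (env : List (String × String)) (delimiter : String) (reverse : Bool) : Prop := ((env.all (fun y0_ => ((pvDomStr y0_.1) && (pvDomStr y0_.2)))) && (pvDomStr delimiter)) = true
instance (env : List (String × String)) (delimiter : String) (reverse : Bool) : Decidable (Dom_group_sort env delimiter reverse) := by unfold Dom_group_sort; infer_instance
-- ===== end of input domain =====

-- B replaces A's single stable sort under a (prefix, rest) tuple key by buckets: keys are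
-- grouped by lowercased prefix (found via find/slicing, not split), the prefixes and each
-- bucket are sorted separately and the result dict is filled bucket by bucket; objective:
-- alternative algorithm, not claimed faster.

-- ===== PORT A =====
-- group_key(k): parts = k.split(delimiter, 1); (parts[0].lower(), parts[1].lower() if len>1 else "")
def pvGroupKey (delimiter k : String) : String × String :=
  let parts := (PySem.Str.splitMax? k delimiter 1).getD []
  (PySem.Str.lower ((PySem.List.pyGet? parts 0).getD ""),
   if parts.length > 1 then PySem.Str.lower ((PySem.List.pyGet? parts 1).getD "") else "")

def group_sort (env : List (String × String)) (delimiter : String) (reverse : Bool) : List (String × String) :=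
  let d := PySem.Dict.ofList env
  let sortedKeys := PySem.List.sorted2 d.keys
      (fun k => (pvGroupKey delimiter k).1) (fun k => (pvGroupKey delimiter k).2) reverse
  (sortedKeys.foldl (fun acc k => acc.insert k (d.getD k "")) PySem.Dict.empty).items

-- ===== PORT B =====
-- prefix_of(k): i = k.find(delimiter); (k if i < 0 else k[:i]).lower()
def pvPrefixOf (delimiter k : String) : String :=
  let i := PySem.Str.find k delimiter
  PySem.Str.lower (if i < 0 then k else PySem.Str.slice k none (some i))

-- rest_of(k): i = k.find(delimiter); "" if i < 0 else k[i + len(delimiter):].lower()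
def pvRestOf (delimiter k : String) : String :=
  let i := PySem.Str.find k delimiter
  if i < 0 then "" else PySem.Str.lower (PySem.Str.slice k (some (i + PySem.Str.len delimiter)) none)

def group_sort_alt (env : List (String × String)) (delimiter : String) (reverse : Bool) : List (String × String) :=
  let d := PySem.Dict.ofList env
  -- buckets.setdefault(prefix_of(k), []).append(k) over the keys in order
  let buckets := d.keys.foldl
      (fun b k => b.modify (pvPrefixOf delimiter k) [] (fun v => v ++ [k])) PySem.Dict.empty
  -- result[k] = env[k] inside the nested loops over sorted prefixes / sorted buckets
  ((PySem.List.sorted buckets.keys (fun p => p) reverse).foldl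
      (fun res p =>
        (PySem.List.sorted (buckets.getD p []) (fun k => pvRestOf delimiter k) reverse).foldl
          (fun res k => res.insert k (d.getD k "")) res)
      PySem.Dict.empty).items

-- ===== PRECONDITION & SPEC =====
-- Pre_ excludes only the inputs where Python A raises: k.split("", 1) is a ValueError (empty
-- separator), reached as soon as there is at least one key.
def Pre_group_sort (env : List (String × String)) (delimiter : String) (reverse : Bool) : Prop :=
  delimiter ≠ "" ∨ env = []
instance (env : List (String × String)) (delimiter : String) (reverse : Bool) : Decidable (Pre_group_sort env delimiter reverse) := by unfold Pre_group_sort; infer_instance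

def pvWitness_group_sort : (List (String × String)) × String × Bool :=
  ([("A_b", "1"), ("c", "2"), ("a_A", "3")], "_", false)

def Spec_group_sort (env : List (String × String)) (delimiter : String) (reverse : Bool) (out : List (String × String)) : Prop := out = group_sort_alt env delimiter reverse
instance (env : List (String × String)) (delimiter : String) (reverse : Bool) (out : List (String × String)) : Decidable (Spec_group_sort env delimiter reverse out) := by unfold Spec_group_sort; infer_instance

-- ===== CLAIM (what is proved, stated in full; the proofs are below) =====
def Claim_equal_group_sort : Prop := ∀ (env : List (String × String)) (delimiter : String) (reverse : Bool), Dom_group_sort env delimiter reverse → Pre_group_sort env delimiter reverse → Spec_group_sort env delimiter reverse (group_sort env delimiter reverse)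

-- ===== LEMMAS AND PROOFS =====

-- insertBy unfolding on a cons (structural equations of PySem.List.insertBy)
theorem pv_insertBy_nil {α : Type} (bef : α → α → Bool) (x : α) :
    PySem.List.insertBy bef x [] = [x] := rfl

theorem pv_insertBy_cons {α : Type} (bef : α → α → Bool) (x y : α) (ys : List α) :
    PySem.List.insertBy bef x (y :: ys) =
      if bef x y then x :: y :: ys else y :: PySem.List.insertBy bef x ys := rfl

-- membership through an insertion-sort fold
theorem pv_mem_foldl_ins {α : Type} (bef : α → α → Bool) (l : List α) :
    ∀ (acc : List α) (z : α),
      (z ∈ l.foldl (fun a x => PySem.List.insertBy bef x a) acc ↔ z ∈ acc ∨ z ∈ l) := by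
  induction l with
  | nil => simp
  | cons y ys ih =>
      intro acc z
      simp only [List.foldl_cons, ih, PySem.List.mem_insertBy, List.mem_cons]
      tauto

-- inserting an element that goes past a whole block
theorem pv_insertBy_append_of_false {α : Type} (bef : α → α → Bool) (k : α) (B R : List α)
    (h : ∀ x ∈ B, bef k x = false) :
    PySem.List.insertBy bef k (B ++ R) = B ++ PySem.List.insertBy bef k R := by
  induction B with
  | nil => rfl
  | cons y B' ih =>
      have hy : bef k y = false := h y (by simp)
      simp [pv_insertBy_cons, hy, ih fun x hx => h x (by simp [hx])]

-- inserting an element strictly before everything in L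
theorem pv_insertBy_all_true {α : Type} (bef : α → α → Bool) (k : α) (L : List α)
    (h : ∀ x ∈ L, bef k x = true) : PySem.List.insertBy bef k L = k :: L := by
  cases L with
  | nil => rfl
  | cons y ys => simp [pv_insertBy_cons, h y (by simp)]

-- insertBy is a permutation of consing
theorem pv_insertBy_perm {α : Type} (bef : α → α → Bool) (x : α) (l : List α) :
    (PySem.List.insertBy bef x l).Perm (x :: l) := by
  induction l with
  | nil => rfl
  | cons z zs ih =>
      by_cases h : bef x z = true
      · simp [pv_insertBy_cons, h]
      · rw [pv_insertBy_cons, if_neg h]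
        exact (ih.cons z).trans (List.Perm.swap x z zs)

-- inserting an element that lands inside block B (where bef agrees with br) and
-- strictly before everything in R
theorem pv_insertBy_append_switch {α : Type} (bef br : α → α → Bool) (k : α) (B R : List α)
    (hB : ∀ x ∈ B, bef k x = br k x) (hR : ∀ x ∈ R, bef k x = true) :
    PySem.List.insertBy bef k (B ++ R) = PySem.List.insertBy br k B ++ R := by
  induction B with
  | nil =>
      cases R with
      | nil => rfl
      | cons y ys => simp [pv_insertBy_cons, pv_insertBy_nil, hR y (by simp)]
  | cons y B' ih =>
      have hy : bef k y = br k y := hB y (by simp)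
      by_cases h : br k y = true
      · simp [pv_insertBy_cons, hy, h]
      · simp only [List.cons_append, pv_insertBy_cons, hy,
          h, Bool.false_eq_true, if_false, if_neg h]
        rw [ih fun x hx => hB x (by simp [hx])]

-- insertBy preserves strict (Pairwise) sortedness when the new element is fresh
theorem pv_pairwise_insertBy {κ : Type} (bid : κ → κ → Bool)
    (htr : ∀ a b c, bid a b = true → bid b c = true → bid a c = true)
    (hto : ∀ a b, a ≠ b → bid a b = true ∨ bid b a = true)
    (x : κ) (l : List κ) (hl : l.Pairwise (fun a b => bid a b = true))
    (hx : ∀ y ∈ l, y ≠ x) :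
    (PySem.List.insertBy bid x l).Pairwise (fun a b => bid a b = true) := by
  induction l with
  | nil => simp [pv_insertBy_nil]
  | cons y ys ih =>
      rcases List.pairwise_cons.1 hl with ⟨hy, hys⟩
      by_cases h : bid x y = true
      · rw [pv_insertBy_cons, if_pos h]
        refine List.pairwise_cons.2 ⟨?_, hl⟩
        intro z hz
        rcases List.mem_cons.1 hz with rfl | hz
        · exact h
        · exact htr x y z h (hy z hz)
      · rw [pv_insertBy_cons, if_neg h]
        refine List.pairwise_cons.2 ⟨?_, ih hys fun z hz => hx z (by simp [hz])⟩
        intro z hz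
        rcases (PySem.List.mem_insertBy bid x z ys).1 hz with rfl | hz
        · rcases hto y z (hx y (by simp)) with h1 | h1
          · exact h1
          · exact absurd h1 (by simpa using h)
        · exact hy z hz

-- the insertion-sort fold of a Nodup list is strictly Pairwise-sorted
theorem pv_pairwise_foldl_ins {κ : Type} (bid : κ → κ → Bool)
    (htr : ∀ a b c, bid a b = true → bid b c = true → bid a c = true)
    (hto : ∀ a b, a ≠ b → bid a b = true ∨ bid b a = true) :
    ∀ (l : List κ) (acc : List κ), (acc ++ l).Nodup →
      acc.Pairwise (fun a b => bid a b = true) →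
      (l.foldl (fun a x => PySem.List.insertBy bid x a) acc).Pairwise
        (fun a b => bid a b = true) := by
  intro l
  induction l with
  | nil => intro acc _ h2; simpa using h2
  | cons y ys ih =>
      intro acc h1 h2
      simp only [List.foldl_cons]
      apply ih
      · have P : (PySem.List.insertBy bid y acc ++ ys).Perm (acc ++ y :: ys) :=
          (((pv_insertBy_perm bid y acc).append_right ys)).trans List.perm_middle.symm
        exact P.nodup_iff.2 h1
      · apply pv_pairwise_insertBy bid htr hto y acc h2
        intro z hz hzy
        exact List.disjoint_of_nodup_append h1 hz (by simp [hzy])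

-- flatMap respects pointwise equality of the block function
theorem pv_flatMap_congr {κ α : Type} (l : List κ) (f g : κ → List α)
    (h : ∀ q ∈ l, f q = g q) : l.flatMap f = l.flatMap g := by
  induction l with
  | nil => rfl
  | cons y ys ih => simp [List.flatMap_cons, h y (by simp), ih fun q hq => h q (by simp [hq])]

-- CORE LEMMA: inserting one element into a bucket-decomposed list is inserting it
-- into its own bucket (creating the bucket at its sorted position if absent)
theorem pv_insert_bucket {α κ : Type} [DecidableEq κ]
    (bid : κ → κ → Bool) (br : α → α → Bool) (p : α → κ)
    (hirr : ∀ a, bid a a = false)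
    (htr : ∀ a b c, bid a b = true → bid b c = true → bid a c = true)
    (hto : ∀ a b, a ≠ b → bid a b = true ∨ bid b a = true)
    (k : α) :
    ∀ (qs : List κ) (g : κ → List α),
      qs.Pairwise (fun a b => bid a b = true) →
      (∀ q ∈ qs, ∀ x ∈ g q, p x = q) →
      (p k ∉ qs → g (p k) = []) →
      PySem.List.insertBy (fun a b => bid (p a) (p b) || (!(bid (p b) (p a)) && br a b)) k
          (qs.flatMap g)
        = (if p k ∈ qs then qs else PySem.List.insertBy bid (p k) qs).flatMap
            (fun q => if q = p k then PySem.List.insertBy br k (g q) else g q) := by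
  intro qs
  induction qs with
  | nil =>
      intro g _ _ hnil
      simp [pv_insertBy_nil, hnil (by simp)]
  | cons q qs' ih =>
      intro g hq hg hnil
      rcases List.pairwise_cons.1 hq with ⟨hqall, hq'⟩
      by_cases h1 : bid (p k) q = true
      · have hne : p k ∉ q :: qs' := by
          intro hmem
          rcases List.mem_cons.1 hmem with rfl | hmem
          · exact absurd h1 (by simp [hirr])
          · exact absurd (htr _ _ _ h1 (hqall _ hmem)) (by simp [hirr])
        have hall : ∀ x ∈ (q :: qs').flatMap g,
            (bid (p k) (p x) || (!(bid (p x) (p k)) && br k x)) = true := by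
          intro x hx
          rcases List.mem_flatMap.1 hx with ⟨q', hq'mem, hxg⟩
          have hpx : p x = q' := hg q' hq'mem x hxg
          rcases List.mem_cons.1 hq'mem with rfl | hmem
          · simp [hpx, h1]
          · simp [hpx, htr _ _ _ h1 (hqall _ hmem)]
        rw [pv_insertBy_all_true _ k _ hall]
        rw [if_neg hne, pv_insertBy_cons, if_pos h1]
        have hgk : g (p k) = [] := hnil hne
        have hrest : (q :: qs').flatMap
            (fun q' => if q' = p k then PySem.List.insertBy br k (g q') else g q')
            = (q :: qs').flatMap g := by
          apply pv_flatMap_congr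
          intro q' hmem
          rw [if_neg]; intro h; exact hne (h ▸ hmem)
        conv_rhs => rw [List.flatMap_cons]
        rw [hrest]
        simp [hgk, pv_insertBy_nil]
      · by_cases h2 : bid q (p k) = true
        · have hneq : p k ≠ q := by rintro rfl; exact absurd h2 (by simp [hirr])
          have hB : ∀ x ∈ g q, (bid (p k) (p x) || (!(bid (p x) (p k)) && br k x)) = false := by
            intro x hx
            have hpx : p x = q := hg q (by simp) x hx
            simp [hpx, h1, h2]
          rw [List.flatMap_cons, pv_insertBy_append_of_false _ k (g q) _ hB]
          rw [ih g hq' (fun q' hm x hx => hg q' (by simp [hm]) x hx)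
              (fun hm => hnil (by simp [hneq, hm]))]
          by_cases h3 : p k ∈ qs'
          · rw [if_pos h3, if_pos (by simp [h3]), List.flatMap_cons,
              if_neg (Ne.symm hneq)]
          · rw [if_neg h3, if_neg (by simp [hneq, h3]), pv_insertBy_cons, if_neg h1,
              List.flatMap_cons, if_neg (Ne.symm hneq)]
        · have heq : q = p k := by
            by_contra hne
            rcases hto q (p k) hne with h | h
            · exact h2 h
            · exact h1 h
          subst heq
          have hB : ∀ x ∈ g (p k), (bid (p k) (p x) || (!(bid (p x) (p k)) && br k x)) = br k x := by
            intro x hx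
            have hpx : p x = p k := hg (p k) (by simp) x hx
            simp [hpx, hirr]
          have hR : ∀ x ∈ qs'.flatMap g, (bid (p k) (p x) || (!(bid (p x) (p k)) && br k x)) = true := by
            intro x hx
            rcases List.mem_flatMap.1 hx with ⟨q', hq'mem, hxg⟩
            have hpx : p x = q' := hg q' (by simp [hq'mem]) x hxg
            simp [hpx, hqall q' hq'mem]
          rw [List.flatMap_cons, pv_insertBy_append_switch _ (br) k (g (p k)) _ hB hR]
          rw [if_pos (by simp)]
          conv_rhs => rw [List.flatMap_cons]
          rw [if_pos rfl]
          congr 1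
          apply pv_flatMap_congr
          intro q' hm
          rw [if_neg]
          intro h
          rw [h] at hm
          exact absurd (hqall _ hm) (by simp [hirr])

-- MAIN LEMMA: the stable insertion sort under the lexicographic (prefix, rest)
-- comparison equals the bucket decomposition (sorted prefixes of the grouped
-- keys, each bucket insertion-sorted), for any bucket comparison br
theorem pv_bucket_main {α κ : Type} [DecidableEq κ] [BEq κ] [LawfulBEq κ]
    (bid : κ → κ → Bool) (br : α → α → Bool) (p : α → κ)
    (hirr : ∀ a, bid a a = false)
    (htr : ∀ a b c, bid a b = true → bid b c = true → bid a c = true)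
    (hto : ∀ a b, a ≠ b → bid a b = true ∨ bid b a = true)
    (ks : List α) :
    ks.foldl (fun acc x =>
        PySem.List.insertBy (fun a b => bid (p a) (p b) || (!(bid (p b) (p a)) && br a b)) x acc) []
      = ((PySem.Set.ofList (ks.map p)).foldl (fun acc q => PySem.List.insertBy bid q acc) []).flatMap
          (fun q => (ks.filter (fun x => decide (p x = q))).foldl
              (fun acc x => PySem.List.insertBy br x acc) []) := by
  induction ks using List.reverseRecOn with
  | nil => rfl
  | append_singleton ks k ih =>
      rw [List.foldl_append, List.foldl_cons, List.foldl_nil, ih]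
      set qs := ((PySem.Set.ofList (ks.map p)).foldl (fun acc q => PySem.List.insertBy bid q acc) []) with hqs
      have hmemqs : ∀ z, z ∈ qs ↔ z ∈ ks.map p := by
        intro z
        rw [hqs, pv_mem_foldl_ins]
        simp [PySem.Set.mem_ofList]
      have hpair : qs.Pairwise (fun a b => bid a b = true) := by
        rw [hqs]
        exact pv_pairwise_foldl_ins bid htr hto _ [] (by simpa using PySem.Set.nodup_ofList (ks.map p)) (by simp)
      set g := fun q => (ks.filter (fun x => decide (p x = q))).foldl
          (fun acc x => PySem.List.insertBy br x acc) [] with hgdef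
      have hg : ∀ q ∈ qs, ∀ x ∈ g q, p x = q := by
        intro q _ x hx
        rw [hgdef] at hx
        have := (pv_mem_foldl_ins br _ [] x).1 hx
        simp only [List.mem_nil_iff, false_or, List.mem_filter] at this
        exact of_decide_eq_true this.2
      have hnil : p k ∉ qs → g (p k) = [] := by
        intro hne
        have hfil : ks.filter (fun x => decide (p x = p k)) = [] := by
          rw [List.filter_eq_nil_iff]
          intro x hx hdx
          exact hne ((hmemqs (p k)).2 (List.mem_map.2 ⟨x, hx, of_decide_eq_true hdx⟩))
        simp only [hgdef]
        rw [hfil]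
        rfl
      rw [pv_insert_bucket bid br p hirr htr hto k qs g hpair hg hnil]
      have hbucket : ∀ q, ((ks ++ [k]).filter (fun x => decide (p x = q))).foldl
          (fun acc x => PySem.List.insertBy br x acc) []
          = (if q = p k then PySem.List.insertBy br k (g q) else g q) := by
        intro q
        rw [List.filter_append]
        by_cases h : p k = q
        · subst h
          simp [List.foldl_append, hgdef]
        · have : [k].filter (fun x => decide (p x = q)) = [] := by simp [h]
          rw [this, List.append_nil, if_neg (fun hh => h hh.symm), hgdef]
      have hofl : PySem.Set.ofList ((ks ++ [k]).map p)
          = PySem.Set.add (PySem.Set.ofList (ks.map p)) (p k) := by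
        simp [PySem.Set.ofList, List.foldl_append]
      by_cases hmem : p k ∈ qs
      · rw [if_pos hmem]
        have : PySem.Set.add (PySem.Set.ofList (ks.map p)) (p k) = PySem.Set.ofList (ks.map p) := by
          have hin : p k ∈ PySem.Set.ofList (ks.map p) :=
            (PySem.Set.mem_ofList (ks.map p) (p k)).2 ((hmemqs _).1 hmem)
          have hc : (PySem.Set.ofList (ks.map p)).contains (p k) = true :=
            List.contains_iff_mem.mpr hin
          unfold PySem.Set.add
          rw [hc]
          simp
        rw [hofl, this, ← hqs]
        exact (pv_flatMap_congr qs _ _ (fun q _ => (hbucket q).symm))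
      · rw [if_neg hmem]
        have hnm : p k ∉ PySem.Set.ofList (ks.map p) := by
          rw [PySem.Set.mem_ofList]; intro h; exact hmem ((hmemqs _).2 h)
        have : PySem.Set.add (PySem.Set.ofList (ks.map p)) (p k)
            = PySem.Set.ofList (ks.map p) ++ [p k] := by
          have hc : (PySem.Set.ofList (ks.map p)).contains (p k) = false := by
            rw [← Bool.not_eq_true]
            exact fun h => hnm (List.contains_iff_mem.mp h)
          unfold PySem.Set.add
          rw [hc]
          simp
        rw [hofl, this, List.foldl_append, List.foldl_cons, List.foldl_nil, ← hqs]
        exact (pv_flatMap_congr _ _ _ (fun q _ => (hbucket q).symm))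

-- the two key lists coincide (p = lowercased prefix, r = lowercased rest)
theorem pv_keys_eq (ks : List String) (delimiter : String) (reverse : Bool) :
    PySem.List.sorted2 ks (fun k => (pvGroupKey delimiter k).1)
        (fun k => (pvGroupKey delimiter k).2) reverse
      = ((PySem.List.sorted
            (ks.foldl (fun g k => g.modify (pvGroupKey delimiter k).1 [] (fun v => v ++ [k]))
              PySem.Dict.empty).keys (fun q => q) reverse).flatMap
          (fun q => PySem.List.sorted
            ((ks.foldl (fun g k => g.modify (pvGroupKey delimiter k).1 [] (fun v => v ++ [k]))
              PySem.Dict.empty).getD q [])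
            (fun k => (pvGroupKey delimiter k).2) reverse)) := by
  set p := fun k => (pvGroupKey delimiter k).1 with hp
  set r := fun k => (pvGroupKey delimiter k).2 with hr
  have hkeys : (ks.foldl (fun g k => g.modify (p k) [] (fun v => v ++ [k]))
      PySem.Dict.empty).keys = PySem.Set.ofList (ks.map p) := by
    rw [PySem.Dict.keys_foldl_modify_key ks p [] (fun _ x v => v ++ [x]) PySem.Dict.empty]
    rfl
  have hgetD : ∀ q, (ks.foldl (fun g k => g.modify (p k) [] (fun v => v ++ [k]))
      PySem.Dict.empty).getD q [] = ks.filter (fun x => decide (p x = q)) := by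
    intro q
    have h1 : ks.foldl (fun g k => g.modify (p k) [] (fun v => v ++ [k])) PySem.Dict.empty
        = (ks.map (fun k => (p k, k))).foldl
            (fun d pr => d.modify pr.1 [] (fun v => v ++ [pr.2])) PySem.Dict.empty := by
      rw [List.foldl_map]
    rw [h1, PySem.Dict.getD_foldl_modify_append]
    simp only [PySem.Dict.getD_empty, List.nil_append, List.filter_map, List.map_map]
    have : ((fun pr : String × String => pr.1 == q) ∘ fun k => (p k, k))
        = fun x => decide (p x = q) := by
      funext x; by_cases h : p x = q <;> simp [h, beq_iff_eq]
    rw [this]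
    simp [Function.comp_def]
  rw [hkeys]
  cases reverse with
  | false =>
      have := pv_bucket_main (fun a b : String => decide (a < b)) (fun a b => decide (r a < r b)) p
        (by intro a; simp) (by intro a b c h1 h2; simp at *; exact lt_trans h1 h2)
        (by intro a b h; simpa using lt_or_gt_of_ne h) ks
      simp only [PySem.List.sorted2, PySem.List.sorted, Bool.false_eq_true, if_false]
      rw [this]
      exact pv_flatMap_congr _ _ _ (fun q _ => by rw [hgetD q])
  | true =>
      have := pv_bucket_main (fun a b : String => decide (b < a)) (fun a b => decide (r b < r a)) p
        (by intro a; simp) (by intro a b c h1 h2; simp at *; exact lt_trans h2 h1)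
        (by intro a b h; simpa using (lt_or_gt_of_ne h).symm) ks
      simp only [PySem.List.sorted2, PySem.List.sorted, eq_self_iff_true, if_true]
      rw [this]
      exact pv_flatMap_congr _ _ _ (fun q _ => by rw [hgetD q])

-- ---- B's find/slicing key helpers agree with A's split-based group_key ----

-- structural step equation of splitOnMax.go on a cons
theorem pv_go_step (sep cur : List Char) (acc : List (List Char)) (f m : Nat) (c : Char) (rest : List Char) :
    PySem.Chars.splitOnMax.go sep (f+1) m (c :: rest) cur acc =
      if m = 0 then ((cur.reverse ++ (c :: rest)) :: acc).reverse
      else if sep.isPrefixOf (c :: rest) then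
        PySem.Chars.splitOnMax.go sep f (m-1) (List.drop sep.length (c :: rest)) [] (cur.reverse :: acc)
      else PySem.Chars.splitOnMax.go sep f m rest (c :: cur) acc := rfl

-- with the split budget exhausted the rest of the string is the last piece
theorem pv_go_m0 (sep : List Char) (acc : List (List Char)) (f : Nat) (l : List Char) :
    PySem.Chars.splitOnMax.go sep f 0 l [] acc = (l :: acc).reverse := by
  cases f with
  | zero => simp [PySem.Chars.splitOnMax.go]
  | succ f => cases l with
    | nil => rfl
    | cons c rest => rw [pv_go_step]; simp

theorem pv_find_of_prefix (s sep : List Char) (h : sep <+: s) : PySem.Chars.find s sep = 0 := by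
  have hinf : sep <:+: s := h.isInfix
  have h0 : 0 ≤ PySem.Chars.find s sep := (PySem.Chars.find_nonneg_iff s sep).2 hinf
  rcases PySem.Chars.find_spec h0 with ⟨h1, h2⟩
  by_contra hne
  have : (0:Nat) < (PySem.Chars.find s sep).toNat := by omega
  exact h2 0 this (by simpa using h)

-- how find steps over one character that does not start a match
theorem pv_find_cons (c : Char) (rest sep : List Char) (hne : ¬ sep <+: (c :: rest)) :
    PySem.Chars.find (c :: rest) sep =
      if PySem.Chars.find rest sep = -1 then -1 else PySem.Chars.find rest sep + 1 := by
  by_cases hinf : sep <:+: rest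
  · have hn : 0 ≤ PySem.Chars.find rest sep := (PySem.Chars.find_nonneg_iff rest sep).2 hinf
    have hinfc : sep <:+: (c :: rest) := List.infix_cons_iff.2 (Or.inr hinf)
    have hm : 0 ≤ PySem.Chars.find (c :: rest) sep := (PySem.Chars.find_nonneg_iff _ sep).2 hinfc
    rcases PySem.Chars.find_spec hn with ⟨hp1, hmin1⟩
    rcases PySem.Chars.find_spec hm with ⟨hp2, hmin2⟩
    have hm0 : (PySem.Chars.find (c :: rest) sep).toNat ≠ 0 := by
      intro h0; rw [h0] at hp2; simp at hp2; exact hne hp2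
    have h1 : (PySem.Chars.find rest sep).toNat ≤ (PySem.Chars.find (c :: rest) sep).toNat - 1 := by
      by_contra hlt
      refine hmin1 ((PySem.Chars.find (c :: rest) sep).toNat - 1) (by omega) ?_
      have hdrop : (c :: rest).drop ((PySem.Chars.find (c :: rest) sep).toNat)
          = rest.drop ((PySem.Chars.find (c :: rest) sep).toNat - 1) := by
        cases hk : (PySem.Chars.find (c :: rest) sep).toNat with
        | zero => omega
        | succ k => simp
      rw [← hdrop]; exact hp2
    have h2 : (PySem.Chars.find (c :: rest) sep).toNat ≤ (PySem.Chars.find rest sep).toNat + 1 := by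
      by_contra hlt
      exact hmin2 ((PySem.Chars.find rest sep).toNat + 1) (by omega) (by simpa using hp1)
    rw [if_neg (by omega)]
    omega
  · have h1 : PySem.Chars.find rest sep = -1 := (PySem.Chars.find_eq_neg_one_iff rest sep).2 hinf
    have h2 : PySem.Chars.find (c :: rest) sep = -1 := by
      apply (PySem.Chars.find_eq_neg_one_iff _ sep).2
      intro h
      rcases List.infix_cons_iff.1 h with h | h
      · exact hne h
      · exact hinf h
    rw [h1, if_pos rfl, h2]

-- one-split run of splitOnMax.go characterised by find
theorem pv_go_one (sep : List Char) (hsep : sep ≠ []) :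
    ∀ (s : List Char) (f : Nat) (cur : List Char) (acc : List (List Char)), s.length < f →
    PySem.Chars.splitOnMax.go sep f 1 s cur acc =
      if PySem.Chars.find s sep = -1
      then ((cur.reverse ++ s) :: acc).reverse
      else ((s.drop ((PySem.Chars.find s sep).toNat + sep.length))
              :: (cur.reverse ++ s.take (PySem.Chars.find s sep).toNat) :: acc).reverse := by
  intro s
  induction s with
  | nil =>
      intro f cur acc hf
      cases f with
      | zero => omega
      | succ f =>
          have : PySem.Chars.find [] sep = -1 := by
            apply (PySem.Chars.find_eq_neg_one_iff _ sep).2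
            intro h
            simp at h
            exact hsep h
          rw [this]
          simp [PySem.Chars.splitOnMax.go]
  | cons c rest ih =>
      intro f cur acc hf
      cases f with
      | zero => omega
      | succ f =>
          rw [pv_go_step, if_neg (by omega)]
          by_cases hp : sep.isPrefixOf (c :: rest)
          · rw [if_pos hp]
            have hpre : sep <+: (c :: rest) := List.isPrefixOf_iff_prefix.1 hp
            have hf0 : PySem.Chars.find (c :: rest) sep = 0 := pv_find_of_prefix _ _ hpre
            rw [hf0]
            simp only [show (1:Nat) - 1 = 0 from rfl]
            rw [pv_go_m0]
            simp
          · rw [if_neg hp]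
            have hnp : ¬ sep <+: (c :: rest) := fun h => hp (List.isPrefixOf_iff_prefix.2 h)
            rw [ih f (c :: cur) acc (by simpa using Nat.lt_of_succ_lt_succ hf)]
            rw [pv_find_cons c rest sep hnp]
            by_cases hr : PySem.Chars.find rest sep = -1
            · rw [if_pos hr, if_pos hr, if_pos rfl]
              simp
            · have hge : 0 ≤ PySem.Chars.find rest sep := by
                have := PySem.Chars.neg_one_le_find rest sep
                omega
              rw [if_neg hr, if_neg hr, if_neg (by omega)]
              have ht : (PySem.Chars.find rest sep + 1).toNat = (PySem.Chars.find rest sep).toNat + 1 := by omega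
              rw [ht]
              have hd : List.drop ((PySem.Chars.find rest sep).toNat + 1 + sep.length) (c :: rest)
                  = List.drop ((PySem.Chars.find rest sep).toNat + sep.length) rest := by
                have : (PySem.Chars.find rest sep).toNat + 1 + sep.length
                    = ((PySem.Chars.find rest sep).toNat + sep.length) + 1 := by omega
                rw [this, List.drop_succ_cons]
              rw [hd]
              simp

-- s.split(sep, 1) in terms of the first occurrence of sep
theorem pv_splitOnMax_one (s sep : List Char) (hsep : sep ≠ []) :
    PySem.Chars.splitOnMax s sep 1 =
      if PySem.Chars.find s sep = -1 then [s]
      else [s.take (PySem.Chars.find s sep).toNat,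
            s.drop ((PySem.Chars.find s sep).toNat + sep.length)] := by
  have h : PySem.Chars.splitOnMax s sep 1 = PySem.Chars.splitOnMax.go sep (s.length + 1) 1 s [] [] := by
    simp [PySem.Chars.splitOnMax]
  rw [h, pv_go_one sep hsep s (s.length + 1) [] [] (by omega)]
  split <;> simp

theorem pv_parts_eq (delimiter k : String) (hd : delimiter ≠ "") :
    (PySem.Str.splitMax? k delimiter 1).getD [] =
      (if PySem.Chars.find k.toList delimiter.toList = -1 then [k.toList]
       else [k.toList.take (PySem.Chars.find k.toList delimiter.toList).toNat,
             k.toList.drop ((PySem.Chars.find k.toList delimiter.toList).toNat + delimiter.toList.length)]).map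
        String.ofList := by
  have hne : delimiter.toList ≠ [] := by
    intro h; apply hd
    have := congrArg String.ofList h
    simpa using this
  rw [PySem.Str.splitMax?]
  rw [PySem.Chars.splitMax?]
  rw [if_neg (by simpa using hne)]
  rw [pv_splitOnMax_one k.toList delimiter.toList hne]
  rfl

theorem pv_prefix_eq (delimiter k : String) (hd : delimiter ≠ "") :
    pvPrefixOf delimiter k = (pvGroupKey delimiter k).1 := by
  have hfind : PySem.Str.find k delimiter = PySem.Chars.find k.toList delimiter.toList := by
    simp [PySem.Str.find_eq]
  have hlb := PySem.Chars.neg_one_le_find k.toList delimiter.toList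
  simp only [pvPrefixOf, pvGroupKey, pv_parts_eq delimiter k hd, hfind]
  by_cases h : PySem.Chars.find k.toList delimiter.toList = -1
  · rw [if_pos h, if_pos (by omega)]
    simp
  · rw [if_neg h, if_neg (by omega)]
    simp only [List.map_cons, List.map_nil, PySem.List.pyGet?_zero_cons, Option.getD_some]
    apply String.toList_inj.1
    simp only [PySem.Str.toList_lower]
    congr 1
    rw [String.toList_ofList, PySem.Str.toList_slice, PySem.Chars.slice_eq_listSlice,
      PySem.List.slice_to k.toList (show (0:Int) ≤ PySem.Chars.find k.toList delimiter.toList by omega)]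

theorem pv_rest_eq (delimiter k : String) (hd : delimiter ≠ "") :
    pvRestOf delimiter k = (pvGroupKey delimiter k).2 := by
  have hfind : PySem.Str.find k delimiter = PySem.Chars.find k.toList delimiter.toList := by
    simp [PySem.Str.find_eq]
  have hlb := PySem.Chars.neg_one_le_find k.toList delimiter.toList
  simp only [pvRestOf, pvGroupKey, pv_parts_eq delimiter k hd, hfind]
  by_cases h : PySem.Chars.find k.toList delimiter.toList = -1
  · rw [if_pos (by omega), if_pos h]
    simp
  · rw [if_neg (by omega), if_neg h]
    simp only [List.map_cons, List.map_nil, List.length_cons, List.length_nil]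
    rw [if_pos (by omega)]
    have hget : PySem.List.pyGet? [String.ofList (List.take (PySem.Chars.find k.toList delimiter.toList).toNat k.toList), String.ofList (List.drop ((PySem.Chars.find k.toList delimiter.toList).toNat + delimiter.toList.length) k.toList)] 1 = some (String.ofList (List.drop ((PySem.Chars.find k.toList delimiter.toList).toNat + delimiter.toList.length) k.toList)) := by
      rw [show ((1:Int)) = ((1:Nat):Int) by norm_num, PySem.List.pyGet?_natCast]
      rfl
    rw [hget, Option.getD_some]
    apply String.toList_inj.1
    simp only [PySem.Str.toList_lower, String.toList_ofList]
    rw [PySem.Str.toList_slice, PySem.Chars.slice_eq_listSlice,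
      PySem.List.slice_from k.toList (show (0:Int) ≤ PySem.Chars.find k.toList delimiter.toList + PySem.Str.len delimiter by have := PySem.Str.len_eq delimiter; simp [PySem.Str.len_eq] at this ⊢; omega)]
    congr 2
    have hlen : PySem.Str.len delimiter = (delimiter.toList.length : Int) := by
      simp [PySem.Str.len_eq]
    rw [hlen]
    omega

-- ===== VERDICT (by name: the statements are the Claim_ definitions above) =====
theorem group_sort_spec : Claim_equal_group_sort := by
  intro env delimiter reverse _ hpre
  simp only [Spec_group_sort]
  rcases hpre with hd | henv
  · have hp : pvPrefixOf delimiter = fun k => (pvGroupKey delimiter k).1 :=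
      funext fun k => pv_prefix_eq delimiter k hd
    have hr : pvRestOf delimiter = fun k => (pvGroupKey delimiter k).2 :=
      funext fun k => pv_rest_eq delimiter k hd
    simp only [group_sort, group_sort_alt, hp, hr]
    rw [← List.foldl_flatMap, pv_keys_eq]
  · subst henv
    rfl
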